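-- pv_equiv track=rewrite | github.com/cmacht/aoc | 2023/13/puzzle13.py | is_fully_reflected
-- ===== SOURCE A (Python) =====
-- def is_fully_reflected(field, idx, factor=1, is_fully=False):
-- 	#search outwards
-- 	if idx-factor < 0 or idx+1+factor > len(field)-1:
-- 		return True
-- 	if field[idx-factor] == field[idx+1+factor]:
-- 		factor += 1
-- 		is_fully = is_fully_reflected(field, idx, factor, is_fully)
-- 		return is_fully
-- 	else:
-- 		return False
-- ===== SOURCE B (Python) =====
-- def is_fully_reflected(field, idx, factor=1, is_fully=False):
--     # closed-form stopping bound instead of outward recursion: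
--     # pairs (idx-f, idx+1+f) are compared for f = factor .. min(idx, len(field)-2-idx)
--     stop = min(idx, len(field) - 2 - idx) + 1
--     return all(field[idx - f] == field[idx + 1 + f] for f in range(factor, stop))
-- ===== Notes on version B (the rewrite author's own statement) =====
-- stated objective: simpler
-- what changed: Replaces the outward recursion that threads factor/is_fully state with a closed-form stopping bound min(idx, len(field)-2-idx) and a single all(...) comprehension over that range of offsets.
import Mathlib
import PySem

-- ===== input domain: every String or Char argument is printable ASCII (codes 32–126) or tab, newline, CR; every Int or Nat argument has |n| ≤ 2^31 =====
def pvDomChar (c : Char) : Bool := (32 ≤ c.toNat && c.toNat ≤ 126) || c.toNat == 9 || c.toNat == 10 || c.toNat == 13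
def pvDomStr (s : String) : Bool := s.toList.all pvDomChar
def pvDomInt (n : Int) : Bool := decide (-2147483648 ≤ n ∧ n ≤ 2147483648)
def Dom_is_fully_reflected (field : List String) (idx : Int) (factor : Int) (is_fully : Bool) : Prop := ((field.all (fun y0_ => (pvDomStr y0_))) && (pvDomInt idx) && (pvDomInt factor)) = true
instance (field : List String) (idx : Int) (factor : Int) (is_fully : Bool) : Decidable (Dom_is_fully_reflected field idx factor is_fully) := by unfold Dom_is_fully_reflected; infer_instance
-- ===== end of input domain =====

-- B replaces A's outward recursion by a closed-form stopping bound and one all(...) pass (objective: simpler).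

-- shared helper: field[i] with Python semantics; "" only where Python would raise (outside Pre_)
def pvGet (field : List String) (i : Int) : String := (PySem.List.pyGet? field i).getD ""

-- ===== PORT A =====
def is_fully_reflected (field : List String) (idx : Int) (factor : Int) (is_fully : Bool) : Bool :=
  if idx - factor < 0 ∨ idx + 1 + factor > (field.length : Int) - 1 then true
  else if pvGet field (idx - factor) = pvGet field (idx + 1 + factor) then
    is_fully_reflected field idx (factor + 1) is_fully
  else false
termination_by (idx + 1 - factor).toNat
decreasing_by omega

-- ===== PORT B =====
def is_fully_reflected_alt (field : List String) (idx : Int) (factor : Int) (is_fully : Bool) : Bool :=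
  (PySem.List.pyRange factor (min idx ((field.length : Int) - 2 - idx) + 1) 1).all
    (fun f => pvGet field (idx - f) == pvGet field (idx + 1 + f))

-- ===== PRECONDITION & SPEC =====
-- Pre_ is exactly the set of inputs on which Python A returns (no IndexError): either the
-- guard stops immediately, or the first two accessed indices are legal Python indices.
def Pre_is_fully_reflected (field : List String) (idx : Int) (factor : Int) (is_fully : Bool) : Prop :=
  idx - factor < 0 ∨ idx + 1 + factor > (field.length : Int) - 1 ∨
    (idx - factor < (field.length : Int) ∧ -(field.length : Int) ≤ idx + 1 + factor)
instance (field : List String) (idx : Int) (factor : Int) (is_fully : Bool) : Decidable (Pre_is_fully_reflected field idx factor is_fully) := by unfold Pre_is_fully_reflected; infer_instance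

def pvWitness_is_fully_reflected : List String × Int × Int × Bool := (["ab", "cd", "cd", "ab"], 1, 1, false)

def Spec_is_fully_reflected (field : List String) (idx : Int) (factor : Int) (is_fully : Bool) (out : Bool) : Prop := out = is_fully_reflected_alt field idx factor is_fully
instance (field : List String) (idx : Int) (factor : Int) (is_fully : Bool) (out : Bool) : Decidable (Spec_is_fully_reflected field idx factor is_fully out) := by unfold Spec_is_fully_reflected; infer_instance

-- ===== CLAIM (what is proved, stated in full; the proofs are below) =====
def Claim_equal_is_fully_reflected : Prop := ∀ (field : List String) (idx : Int) (factor : Int) (is_fully : Bool), Dom_is_fully_reflected field idx factor is_fully → Pre_is_fully_reflected field idx factor is_fully → Spec_is_fully_reflected field idx factor is_fully (is_fully_reflected field idx factor is_fully)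

-- ===== LEMMAS AND PROOFS =====

theorem is_fully_reflected_eq_alt (field : List String) (idx : Int) (factor : Int) (is_fully : Bool)
    (hpre : Pre_is_fully_reflected field idx factor is_fully) :
    is_fully_reflected field idx factor is_fully = is_fully_reflected_alt field idx factor is_fully := by
  unfold Pre_is_fully_reflected at hpre
  rw [is_fully_reflected]
  by_cases hg : idx - factor < 0 ∨ idx + 1 + factor > (field.length : Int) - 1
  · rw [if_pos hg]
    unfold is_fully_reflected_alt
    rw [PySem.List.pyRange_one_eq_nil (by omega)]
    rfl
  · rw [if_neg hg]
    push_neg at hg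
    have hstep : PySem.List.pyRange factor (min idx ((field.length : Int) - 2 - idx) + 1) 1
        = factor :: PySem.List.pyRange (factor + 1) (min idx ((field.length : Int) - 2 - idx) + 1) 1 :=
      PySem.List.pyRange_one_cons (by omega)
    by_cases heq : pvGet field (idx - factor) = pvGet field (idx + 1 + factor)
    · rw [if_pos heq]
      have hpre' : Pre_is_fully_reflected field idx (factor + 1) is_fully := by
        unfold Pre_is_fully_reflected; omega
      have ih := is_fully_reflected_eq_alt field idx (factor + 1) is_fully hpre'
      rw [ih]
      unfold is_fully_reflected_alt
      rw [hstep, List.all_cons]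
      simp [heq]
    · rw [if_neg heq]
      unfold is_fully_reflected_alt
      rw [hstep, List.all_cons]
      simp [heq]
termination_by (idx + 1 - factor).toNat
decreasing_by omega

-- ===== VERDICT (by name: the statement is the Claim_ definition above) =====
theorem is_fully_reflected_spec : Claim_equal_is_fully_reflected := by
  intro field idx factor is_fully _ hpre
  exact is_fully_reflected_eq_alt field idx factor is_fully hpre
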